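-- pv_equiv track=rewrite | github.com/QaziMuhammedKochgiri/safety | backend/ai/evidence_agent/digest_generator.py | _format_alerts_summary
-- ===== SOURCE A (Python) =====
-- from typing import List, Dict, Optional, Any
--
-- def _format_alerts_summary(alerts: List[Dict[str, Any]]) -> str:
--     """Format alerts summary."""
--     by_priority = {}
--     for alert in alerts:
--         priority = alert.get("priority", "medium")
--         by_priority[priority] = by_priority.get(priority, 0) + 1
--
--     lines = [f"Total alerts: {len(alerts)}", ""]
--
--     if "critical" in by_priority:
--         lines.append(f"  CRITICAL: {by_priority['critical']} alert(s) require immediate attention")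
--     if "high" in by_priority:
--         lines.append(f"  HIGH: {by_priority['high']} alert(s)")
--     if "medium" in by_priority:
--         lines.append(f"  MEDIUM: {by_priority['medium']} alert(s)")
--
--     # List critical alerts
--     critical = [a for a in alerts if a.get("priority") == "critical"]
--     if critical:
--         lines.extend(["", "Critical alerts:"])
--         for alert in critical[:5]:
--             lines.append(f"  ! {alert.get('title', 'Alert')}: {alert.get('message', '')[:100]}")
--
--     return "\n".join(lines)
-- ===== SOURCE B (Python) =====
-- from typing import List, Dict, Any
--
--
-- def _format_alerts_summary(alerts: List[Dict[str, Any]]) -> str: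
--     """Format alerts summary (no intermediate priority dict or lines list)."""
--     critical = [a for a in alerts if a.get("priority", "medium") == "critical"]
--     high = sum(1 for a in alerts if a.get("priority", "medium") == "high")
--     medium = sum(1 for a in alerts if a.get("priority", "medium") == "medium")
--     out = f"Total alerts: {len(alerts)}\n"
--     if critical:
--         out += f"\n  CRITICAL: {len(critical)} alert(s) require immediate attention"
--     if high:
--         out += f"\n  HIGH: {high} alert(s)"
--     if medium:
--         out += f"\n  MEDIUM: {medium} alert(s)"
--     if critical:
--         out += "\n\nCritical alerts:" + "".join(
--             f"\n  ! {a.get('title', 'Alert')}: {a.get('message', '')[:100]}"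
--             for a in critical[:5])
--     return out
-- ===== Notes on version B (the rewrite author's own statement) =====
-- stated objective: simpler
-- what changed: Drops the by_priority counting dict and the lines list: each category count is a direct scan (comprehension/sum), and the result string is accumulated directly with embedded newlines instead of joining a list of lines.
import Mathlib
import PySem

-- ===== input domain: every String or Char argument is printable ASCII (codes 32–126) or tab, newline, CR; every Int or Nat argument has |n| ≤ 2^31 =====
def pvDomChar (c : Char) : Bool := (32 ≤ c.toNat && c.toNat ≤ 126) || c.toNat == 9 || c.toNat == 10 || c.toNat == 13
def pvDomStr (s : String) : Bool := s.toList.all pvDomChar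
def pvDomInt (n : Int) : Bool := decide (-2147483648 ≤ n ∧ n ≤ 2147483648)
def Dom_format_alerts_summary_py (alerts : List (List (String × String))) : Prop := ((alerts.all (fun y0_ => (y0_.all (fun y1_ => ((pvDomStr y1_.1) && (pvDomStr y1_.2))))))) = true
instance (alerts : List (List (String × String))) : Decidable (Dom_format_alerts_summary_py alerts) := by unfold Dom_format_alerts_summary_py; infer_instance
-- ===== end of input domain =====

-- B replaces A's by_priority counting dict and lines list with direct per-category scans
-- and direct string accumulation (objective: simpler); same return value on every input.

-- ===== PORT A =====
def format_alerts_summary_py (alerts : List (List (String × String))) : String :=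
  let by_priority : PySem.Dict String Int := alerts.foldl (fun d alert =>
    let priority := (PySem.Dict.mk alert).getD "priority" "medium"
    d.insert priority (d.getD priority 0 + 1)) PySem.Dict.empty
  let lines : List String := ["Total alerts: " ++ PySem.Int.toStr (alerts.length : Int), ""]
  -- each by_priority[k] lookup below is guarded by `contains`, so getD _ 0 is exactly Python's d[k]
  let lines := if by_priority.contains "critical" then
      lines ++ ["  CRITICAL: " ++ PySem.Int.toStr (by_priority.getD "critical" 0) ++ " alert(s) require immediate attention"] else lines
  let lines := if by_priority.contains "high" then
      lines ++ ["  HIGH: " ++ PySem.Int.toStr (by_priority.getD "high" 0) ++ " alert(s)"] else lines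
  let lines := if by_priority.contains "medium" then
      lines ++ ["  MEDIUM: " ++ PySem.Int.toStr (by_priority.getD "medium" 0) ++ " alert(s)"] else lines
  let critical := alerts.filter (fun a => (PySem.Dict.mk a).get? "priority" == some "critical")
  let lines := if critical ≠ [] then
      (lines ++ ["", "Critical alerts:"]) ++ (PySem.List.slice critical none (some 5)).map (fun alert =>
        "  ! " ++ (PySem.Dict.mk alert).getD "title" "Alert" ++ ": " ++
        PySem.Str.slice ((PySem.Dict.mk alert).getD "message" "") none (some 100))
    else lines
  PySem.Str.join "\n" lines

-- ===== PORT B =====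
def format_alerts_summary_py_alt (alerts : List (List (String × String))) : String :=
  let critical := alerts.filter (fun a => (PySem.Dict.mk a).getD "priority" "medium" == "critical")
  let high : Int := ((alerts.filter (fun a => (PySem.Dict.mk a).getD "priority" "medium" == "high")).map (fun _ => (1 : Int))).sum
  let medium : Int := ((alerts.filter (fun a => (PySem.Dict.mk a).getD "priority" "medium" == "medium")).map (fun _ => (1 : Int))).sum
  let out := "Total alerts: " ++ PySem.Int.toStr (alerts.length : Int) ++ "\n"
  let out := if critical ≠ [] then
      out ++ "\n  CRITICAL: " ++ PySem.Int.toStr (critical.length : Int) ++ " alert(s) require immediate attention" else out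
  let out := if high ≠ 0 then out ++ "\n  HIGH: " ++ PySem.Int.toStr high ++ " alert(s)" else out
  let out := if medium ≠ 0 then out ++ "\n  MEDIUM: " ++ PySem.Int.toStr medium ++ " alert(s)" else out
  let out := if critical ≠ [] then
      out ++ "\n\nCritical alerts:" ++ PySem.Str.join "" ((PySem.List.slice critical none (some 5)).map (fun a =>
        "\n  ! " ++ (PySem.Dict.mk a).getD "title" "Alert" ++ ": " ++
        PySem.Str.slice ((PySem.Dict.mk a).getD "message" "") none (some 100)))
    else out
  out

-- ===== PRECONDITION & SPEC =====
def Spec_format_alerts_summary_py (alerts : List (List (String × String))) (out : String) : Prop := out = format_alerts_summary_py_alt alerts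
instance (alerts : List (List (String × String))) (out : String) : Decidable (Spec_format_alerts_summary_py alerts out) := by unfold Spec_format_alerts_summary_py; infer_instance

-- ===== CLAIM (what is proved, stated in full; the proofs are below) =====
def Claim_equal_format_alerts_summary_py : Prop := ∀ (alerts : List (List (String × String))), Dom_format_alerts_summary_py alerts → Spec_format_alerts_summary_py alerts (format_alerts_summary_py alerts)

-- ===== LEMMAS AND PROOFS =====

-- "\n".join(x :: xs) = x followed by the newline-prefixed pieces of xs
theorem pv_join_cons (sep : List Char) (x : List Char) (xs : List (List Char)) :
    PySem.Chars.join sep (x :: xs) = x ++ (xs.map (fun y => sep ++ y)).flatten := by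
  induction xs generalizing x with
  | nil => simp [PySem.Chars.join_singleton]
  | cons y ys ih => rw [PySem.Chars.join_cons_cons, ih y]; simp

-- "".join(xs) is plain concatenation
theorem pv_join_nil (xs : List (List Char)) : PySem.Chars.join [] xs = xs.flatten := by
  cases xs with
  | nil => simp [PySem.Chars.join_nil]
  | cons x t => rw [pv_join_cons]; simp

-- A's critical-listing predicate (default None) coincides with B's (default "medium")
theorem pv_pred_eq (a : List (String × String)) :
    ((PySem.Dict.mk a).get? "priority" == some "critical")
      = ((PySem.Dict.mk a).getD "priority" "medium" == "critical") := by
  rw [PySem.Dict.getD_eq_get?_getD]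
  cases h : (PySem.Dict.mk a).get? "priority" with
  | none => simp
  | some v => simp

-- key present in the counts ↔ B's corresponding filter is nonempty
theorem pv_contains_iff (alerts : List (List (String × String))) (k : String) :
    ((alerts.map (fun a => (PySem.Dict.mk a).getD "priority" "medium")).contains k = true)
      ↔ alerts.filter (fun a => (PySem.Dict.mk a).getD "priority" "medium" == k) ≠ [] := by
  rw [List.contains_iff_mem]
  simp [List.mem_map, List.filter_eq_nil_iff]

-- the counted value at k is the length of B's filter
theorem pv_count_eq (alerts : List (List (String × String))) (k : String) :
    (alerts.map (fun a => (PySem.Dict.mk a).getD "priority" "medium")).count k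
      = (alerts.filter (fun a => (PySem.Dict.mk a).getD "priority" "medium" == k)).length := by
  rw [List.count_eq_countP, List.countP_map, List.countP_eq_length_filter]
  simp only [Function.comp_def]

-- ===== VERDICT (by name: the statement is the Claim_ definition above) =====
theorem format_alerts_summary_py_spec : Claim_equal_format_alerts_summary_py := by
  intro alerts _
  unfold Spec_format_alerts_summary_py format_alerts_summary_py format_alerts_summary_py_alt
  have hbp : (alerts.foldl (fun d alert =>
      let priority := (PySem.Dict.mk alert).getD "priority" "medium"
      d.insert priority (d.getD priority 0 + 1)) (PySem.Dict.empty : PySem.Dict String Int))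
      = PySem.Dict.counter (alerts.map fun a => (PySem.Dict.mk a).getD "priority" "medium") := by
    rw [← PySem.Dict.foldl_insert_getD_add_one_eq_counter, List.foldl_map]
  rw [hbp]
  simp only [pv_pred_eq, PySem.Dict.contains_counter, PySem.Dict.getD_counter, pv_count_eq,
    PySem.List.sum_map_const_int, mul_one]
  by_cases hc : List.filter (fun a => (PySem.Dict.mk a).getD "priority" "medium" == "critical") alerts = [] <;>
    by_cases hh : List.filter (fun a => (PySem.Dict.mk a).getD "priority" "medium" == "high") alerts = [] <;>
    by_cases hm : List.filter (fun a => (PySem.Dict.mk a).getD "priority" "medium" == "medium") alerts = [] <;>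
    simp only [pv_contains_iff, hc, hh, hm, ne_eq, not_true_eq_false, not_false_eq_true,
      if_true, Nat.cast_eq_zero, List.length_eq_zero_iff, if_neg]
  all_goals refine String.ext ?_
  all_goals simp [PySem.Str.toList_join, pv_join_cons, pv_join_nil, List.map_map, Function.comp_def]
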